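-- pv_equiv track=rewrite | github.com/karanpolobotu/pyproj | recursion.py | split_int_pairs
-- ===== SOURCE A (Python) =====
-- def split_int_pairs(ints):
--     """Returns a copy of ints, a list of integers, with the value None
--     inserted between any two identical values. For example:
--         split_int_pairs([])
--             returns []
--         split_int_pairs([-5])
--             returns [-5]
--         split_int_pairs([-5, 1])
--             returns [-5, 1]
--         split_int_pairs([-5, -5])
--             returns [-5, None, -5]
--         split_int_pairs([0, 1, 0, 1, 1, 0, 0])
--             returns [0, 1, 0, 1, None, 1, 0, None, 0]
--             """
--
--     if len(ints) <= 1: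
--         return ints
--     #create three cases, if length is 0, 1 or 2
--
--     if len(ints) == 2:
--         if ints[0] == ints[1]:
--             ints.insert(1, None)
--             return ints
--         if ints[0] != ints[1]:
--             return ints
--
--     else:
--         holder = []
--         #create a list to break every list into two value lists (2D Array)
--
--         for i in range(len(ints) - 1):
--             holdingValue = split_int_pairs([ints[i], ints[i + 1]])
--
--             if len(holder) == 0:
--                 for j in (holdingValue):
--                     holder.append(j)
--                     #if the 2D lists have 2 element, just append it to our new list
--
--             else:
--                 for k in range(1, len(holdingValue)):
--                     holder.append(holdingValue[k])
--                     #otherwise, compare the individual 2 element lists to our three cases, get our result, and then return it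
--
--
--         return holder
-- ===== SOURCE B (Python) =====
-- def split_int_pairs(ints):
--     """Returns a copy of ints with None inserted between any two
--     identical adjacent values, built in one flat pass."""
--     if len(ints) <= 1:
--         return ints
--     out = [ints[0]]
--     for prev, cur in zip(ints, ints[1:]):
--         if prev == cur:
--             out.append(None)
--         out.append(cur)
--     return out
-- ===== Notes on version B (the rewrite author's own statement) =====
-- stated objective: simpler
-- what changed: Replaces the recursive pair-splitting (a call of the function on every adjacent two-element slice, stitched together with index loops) by one flat pass over zip(ints, ints[1:]) that appends None before each repeated element; equivalence is on the return value only (A mutates its argument in the length-2 equal case, B never does).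
import Mathlib
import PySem

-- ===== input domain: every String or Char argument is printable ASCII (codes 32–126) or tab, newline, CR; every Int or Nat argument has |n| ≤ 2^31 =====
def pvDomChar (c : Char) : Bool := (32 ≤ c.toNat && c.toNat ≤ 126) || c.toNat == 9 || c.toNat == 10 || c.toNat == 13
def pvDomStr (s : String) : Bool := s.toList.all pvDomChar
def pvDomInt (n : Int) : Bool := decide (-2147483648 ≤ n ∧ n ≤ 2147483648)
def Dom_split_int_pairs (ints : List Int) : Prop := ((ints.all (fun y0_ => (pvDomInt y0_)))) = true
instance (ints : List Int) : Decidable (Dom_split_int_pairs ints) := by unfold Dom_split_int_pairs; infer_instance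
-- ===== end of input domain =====

-- B replaces A's recursion on two-element slices by one flat zip pass (simpler); equivalence is about
-- the RETURN value only: Python A mutates its argument in the length-2-equal case, B never mutates.

-- ===== PORT A =====
def split_int_pairs (ints : List Int) : List (Option Int) :=
  if _h1 : ints.length ≤ 1 then ints.map some
  else if _h2 : ints.length = 2 then
    (if PySem.List.pyGetD ints 0 0 = PySem.List.pyGetD ints 1 0 then
      PySem.List.insert (ints.map some) 1 none
    else ints.map some)
  else
    (PySem.List.pyRange 0 ((ints.length : Int) - 1) 1).foldl
      (fun holder i =>
        let hv := split_int_pairs [PySem.List.pyGetD ints i 0, PySem.List.pyGetD ints (i + 1) 0]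
        if holder.length = 0 then
          hv.foldl (fun h j => h ++ [j]) holder
        else
          (PySem.List.pyRange 1 (hv.length : Int) 1).foldl
            (fun h k => h ++ [PySem.List.pyGetD hv k none]) holder) []
  termination_by ints.length
  decreasing_by simp; omega

-- ===== PORT B =====
def split_int_pairs_alt (ints : List Int) : List (Option Int) :=
  if ints.length ≤ 1 then ints.map some
  else
    match ints with
    | [] => []
    | x :: rest =>
        (List.zip (x :: rest) rest).foldl
          (fun out pc => (if pc.1 = pc.2 then out ++ [none] else out) ++ [some pc.2])
          [some x]

-- ===== PRECONDITION & SPEC =====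
def Spec_split_int_pairs (ints : List Int) (out : List (Option Int)) : Prop := out = split_int_pairs_alt ints
instance (ints : List Int) (out : List (Option Int)) : Decidable (Spec_split_int_pairs ints out) := by unfold Spec_split_int_pairs; infer_instance

-- ===== CLAIM (what is proved, stated in full; the proofs are below) =====
def Claim_equal_split_int_pairs : Prop := ∀ (ints : List Int), Dom_split_int_pairs ints → Spec_split_int_pairs ints (split_int_pairs ints)

-- ===== LEMMAS AND PROOFS =====

/-- The canonical recursive shape both programs produce: head, then for each
adjacent pair an optional `none` followed by the next element. -/
def corePairs (x : Int) (rest : List Int) : List (Option Int) :=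
  match rest with
  | [] => [some x]
  | y :: t => (if x = y then [some x, none] else [some x]) ++ corePairs y t

lemma alt_foldl_core (rest : List Int) : ∀ (x : Int) (acc : List (Option Int)),
    (List.zip (x :: rest) rest).foldl
      (fun out pc => (if pc.1 = pc.2 then out ++ [none] else out) ++ [some pc.2])
      (acc ++ [some x]) = acc ++ corePairs x rest := by
  induction rest with
  | nil => intro x acc; simp [corePairs]
  | cons y t ih =>
    intro x acc
    simp only [List.zip_cons_cons, List.foldl_cons, corePairs]
    by_cases h : x = y
    · simpa [h, List.append_assoc] using ih y (acc ++ [some x, none])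
    · simpa [h, List.append_assoc] using ih y (acc ++ [some x])

lemma alt_eq_core (x y : Int) (t : List Int) :
    split_int_pairs_alt (x :: y :: t) = corePairs x (y :: t) := by
  have := alt_foldl_core (y :: t) x []
  simpa [split_int_pairs_alt] using this

lemma pairsplit (a b : Int) :
    split_int_pairs [a, b] =
      (if a = b then [some a, none] else [some a]) ++ [some b] := by
  rw [split_int_pairs]
  rw [dif_neg (by simp), dif_pos (by simp)]
  rw [PySem.List.pyGetD_zero_cons, PySem.List.pyGetD_ofNat' [a, b] 1 0,
      show ([a, b]).getD 1 0 = b from rfl]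
  by_cases h : a = b
  · rw [if_pos h, PySem.List.insert_ofNat _ 1 _ (by simp)]
    simp [h]
  · rw [if_neg h]
    simp [h]

/-- One adjacent-pair contribution in A's main loop. -/
def pairStep (ints : List Int) (i : Int) : List (Option Int) :=
  split_int_pairs [PySem.List.pyGetD ints i 0, PySem.List.pyGetD ints (i + 1) 0]

lemma pairStep_eq (ints : List Int) (i : Int) :
    pairStep ints i =
      (if PySem.List.pyGetD ints i 0 = PySem.List.pyGetD ints (i + 1) 0
        then [some (PySem.List.pyGetD ints i 0), none] else [some (PySem.List.pyGetD ints i 0)])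
      ++ [some (PySem.List.pyGetD ints (i + 1) 0)] := pairsplit _ _

lemma pairStep_ne_nil (ints : List Int) (i : Int) : pairStep ints i ≠ [] := by
  rw [pairStep_eq]; split <;> simp

/-- Once the holder is nonempty, every iteration of A's loop appends `(pairStep).drop 1`. -/
lemma A_loop_nonempty (ints : List Int) (idxs : List Int) :
    ∀ (holder : List (Option Int)), holder ≠ [] →
    idxs.foldl
      (fun holder i =>
        if holder.length = 0 then
          (split_int_pairs [PySem.List.pyGetD ints i 0, PySem.List.pyGetD ints (i + 1) 0]).foldl
            (fun h j => h ++ [j]) holder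
        else
          (PySem.List.pyRange 1
              ((split_int_pairs [PySem.List.pyGetD ints i 0,
                  PySem.List.pyGetD ints (i + 1) 0]).length : Int) 1).foldl
            (fun h k => h ++ [PySem.List.pyGetD
              (split_int_pairs [PySem.List.pyGetD ints i 0,
                PySem.List.pyGetD ints (i + 1) 0]) k none]) holder) holder
    = holder ++ idxs.flatMap (fun i => (pairStep ints i).drop 1) := by
  induction idxs with
  | nil => intro holder _; simp
  | cons i rest ih =>
    intro holder hne
    simp only [List.foldl_cons]
    have hlen : ¬ holder.length = 0 := by simpa [List.length_eq_zero_iff] using hne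
    rw [if_neg hlen]
    have hstep : (PySem.List.pyRange 1 ((pairStep ints i).length : Int) 1).foldl
        (fun h k => h ++ [PySem.List.pyGetD (pairStep ints i) k none]) holder
        = holder ++ (pairStep ints i).drop 1 := by
      rw [PySem.List.foldl_pyRange_pyGetD' (pairStep ints i) none
            (fun h v => h ++ [v]) holder (by omega),
          PySem.List.foldl_append_singleton_eq_self]
      rfl
    rw [show (split_int_pairs [PySem.List.pyGetD ints i 0, PySem.List.pyGetD ints (i + 1) 0])
          = pairStep ints i from rfl,
        hstep, ih (holder ++ (pairStep ints i).drop 1) (by simp [hne]), List.flatMap_cons,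
        List.append_assoc]

/-- `corePairs` as a flat concatenation over positions. -/
lemma core_flat (rest : List Int) : ∀ (x : Int),
    corePairs x rest = [some x] ++ (List.range rest.length).flatMap
      (fun k => (if (x :: rest).getD k 0 = rest.getD k 0 then [none] else [])
        ++ [some (rest.getD k 0)]) := by
  induction rest with
  | nil => intro x; simp [corePairs]
  | cons y t ih =>
    intro x
    rw [corePairs, List.length_cons, List.range_succ_eq_map, List.flatMap_cons, ih y,
        List.flatMap_map]
    simp only [List.getD_cons_zero, List.getD_cons_succ]
    by_cases h : x = y <;> simp [h]

lemma A_eq_core_big (x y : Int) (t : List Int) (ht : t ≠ []) :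
    split_int_pairs (x :: y :: t) = corePairs x (y :: t) := by
  have hn3 : 3 ≤ (x :: y :: t).length := by
    cases t with
    | nil => exact absurd rfl ht
    | cons a s => simp
  rw [split_int_pairs]
  rw [dif_neg (by omega), dif_neg (by omega)]
  set ints := x :: y :: t with hints
  have hsplit : PySem.List.pyRange 0 ((ints.length : Int) - 1) 1
      = 0 :: PySem.List.pyRange 1 ((ints.length : Int) - 1) 1 := by
    have := PySem.List.pyRange_one_cons (a := 0) (b := (ints.length : Int) - 1)
      (by omega)
    simpa using this
  rw [hsplit]
  simp only [List.foldl_cons]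
  rw [if_pos (show ([] : List (Option Int)).length = 0 from rfl)]
  have hfirst : (split_int_pairs [PySem.List.pyGetD ints 0 0,
        PySem.List.pyGetD ints (0 + 1) 0]).foldl
        (fun h j => h ++ [j]) ([] : List (Option Int)) = pairStep ints 0 := by
    simp only [PySem.List.foldl_append_singleton_eq_self, List.nil_append, pairStep]
  rw [hfirst, A_loop_nonempty ints _ (pairStep ints 0) (pairStep_ne_nil ints 0)]
  rw [core_flat (y :: t) x]
  rw [PySem.List.pyRange_one 1 ((ints.length : Int) - 1)]
  rw [List.flatMap_map]
  have hlen : (((ints.length : Int) - 1) - 1).toNat = t.length := by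
    simp [hints]
  rw [hlen]
  have hrange : List.range ((y :: t).length) = 0 :: (List.range t.length).map Nat.succ := by
    rw [show (y :: t).length = t.length + 1 from rfl]
    exact List.range_succ_eq_map
  rw [hrange, List.flatMap_cons, List.flatMap_map]
  have h0 : pairStep ints 0
      = [some x] ++ ((if (x :: y :: t).getD 0 0 = (y :: t).getD 0 0 then [none] else [])
          ++ [some ((y :: t).getD 0 0)]) := by
    rw [pairStep_eq]
    simp only [hints, PySem.List.pyGetD_zero_cons]
    rw [show PySem.List.pyGetD (x :: y :: t) (0 + 1) 0 = y by
      norm_num [PySem.List.pyGetD_ofNat' (x :: y :: t) 1 0, List.getD]]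
    by_cases h : x = y <;> simp [h, List.getD]
  rw [h0, List.append_assoc]
  congr 2
  have hfun : (fun k : Nat => (pairStep ints (1 + (k : Int))).drop 1)
      = (fun k : Nat => (if (x :: y :: t).getD (Nat.succ k) 0 = (y :: t).getD (Nat.succ k) 0
          then [none] else []) ++ [some ((y :: t).getD (Nat.succ k) 0)]) := by
    funext k
    rw [pairStep_eq,
        show (1 + (k : Int)) = ((k + 1 : Nat) : Int) from by push_cast; ring,
        show (((k + 1 : Nat) : Int)) + 1 = ((k + 2 : Nat) : Int) from by push_cast; ring]
    simp only [PySem.List.pyGetD_natCast, hints, List.getD_cons_succ]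
    by_cases h : (y :: t).getD k 0 = (y :: t).getD (k + 1) 0 <;> simp_all
  rw [hfun]

lemma A_eq_core_two (x y : Int) :
    split_int_pairs [x, y] = corePairs x [y] := by
  rw [pairsplit]
  by_cases h : x = y <;> simp [h, corePairs]

-- ===== VERDICT (by name: the statement is the Claim_ definition above) =====
theorem split_int_pairs_spec : Claim_equal_split_int_pairs := by
  intro ints _
  unfold Spec_split_int_pairs
  match ints with
  | [] => simp [split_int_pairs, split_int_pairs_alt]
  | [x] => simp [split_int_pairs, split_int_pairs_alt]
  | x :: y :: t =>
    rw [alt_eq_core]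
    cases t with
    | nil => exact A_eq_core_two x y
    | cons a s => exact A_eq_core_big x y (a :: s) (by simp)
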